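-- pv_equiv track=rewrite | github.com/jayraj1002/Cube-solver | solver_2x2.py | shorten_alg
-- ===== SOURCE A (Python) =====
-- def shorten_alg(alg):
--     if len(alg) < 2:
--         return alg
--     if alg[0][0] != alg[1][0]:
--         return [alg[0]] + shorten_alg(alg[1:])
--     if alg[0] == alg[1] and alg[0][-1] == '2' or alg[0] + "'" == alg[1] or alg[0] == alg[1] + "'":
--         move = []
--     elif alg[0] == alg[1]:
--         move = [alg[0][0] + '2']
--     elif len(alg[0]) == len(alg[1]):
--         move = [alg[0][0]]
--     else:
--         move = [alg[0][0] + "'"]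
--     return shorten_alg(move + alg[2:])
-- ===== SOURCE B (Python) =====
-- def shorten_alg(alg):
--     # Single left-to-right pass with a one-move merge buffer (no slicing/recursion).
--     out = []
--     buf = None
--     for m in alg:
--         if buf is None:
--             buf = m
--         elif buf[0] != m[0]:
--             out.append(buf)
--             buf = m
--         else:
--             buf = _merge(buf, m)
--     if buf is not None:
--         out.append(buf)
--     return out
--
-- def _merge(a, b):
--     # Combine two same-face moves; None means they cancel.
--     if a == b and a[-1] == '2' or a + "'" == b or a == b + "'":
--         return None
--     if a == b:
--         return a[0] + '2'
--     if len(a) == len(b):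
--         return a[0]
--     return a[0] + "'"
-- ===== Notes on version B (the rewrite author's own statement) =====
-- stated objective: faster
-- what changed: Replaced A's slicing recursion (which rebuilds the list and restarts comparison at the front after every merge) with a single left-to-right pass keeping a one-move merge buffer and an output list.
-- outside the precondition, e.g. on shorten_alg(['']): A returns [''], B returns ['']; on shorten_alg(['U', "U'", '']): A returns [''], B returns ['']
import Mathlib
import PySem

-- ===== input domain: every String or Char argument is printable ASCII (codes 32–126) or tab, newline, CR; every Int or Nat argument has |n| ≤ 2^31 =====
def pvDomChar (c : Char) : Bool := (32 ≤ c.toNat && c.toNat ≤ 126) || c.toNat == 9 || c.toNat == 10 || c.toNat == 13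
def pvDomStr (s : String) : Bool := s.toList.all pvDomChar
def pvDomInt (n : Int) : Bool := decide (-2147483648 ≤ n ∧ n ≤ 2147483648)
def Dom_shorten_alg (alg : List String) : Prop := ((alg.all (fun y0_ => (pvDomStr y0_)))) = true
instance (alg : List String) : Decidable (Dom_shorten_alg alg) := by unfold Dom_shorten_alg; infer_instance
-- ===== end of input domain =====

-- B replaces A's quadratic slice-and-recurse with a single left-to-right pass keeping a one-move merge buffer (same results).


-- ===== PORT A =====
-- s[0] as a one-character Python string ("" only on the IndexError inputs excluded by Pre_)
def pvFace (s : String) : String :=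
  match PySem.Str.pyGet? s 0 with
  | some c => String.ofList [c]
  | none => ""

def shorten_alg (alg : List String) : List String :=
  match alg with
  | [] => alg                       -- len(alg) < 2: return alg
  | [_] => alg
  | a :: b :: rest =>
    if PySem.Str.pyGet? a 0 ≠ PySem.Str.pyGet? b 0 then
      a :: shorten_alg (b :: rest)
    else
      shorten_alg
        ((if (a = b ∧ PySem.Str.pyGet? a (-1) = some '2') ∨ a ++ "'" = b ∨ a = b ++ "'" then
            ([] : List String)
          else if a = b then [pvFace a ++ "2"]
          else if PySem.Str.len a = PySem.Str.len b then [pvFace a]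
          else [pvFace a ++ "'"]) ++ rest)
termination_by alg.length
decreasing_by
  · simp
  · split_ifs <;> simp

-- ===== PORT B =====
-- _merge of Source B: combine two same-face moves; none means they cancel
def pvMerge (a b : String) : Option String :=
  if (a = b ∧ PySem.Str.pyGet? a (-1) = some '2') ∨ a ++ "'" = b ∨ a = b ++ "'" then none
  else if a = b then some (pvFace a ++ "2")
  else if PySem.Str.len a = PySem.Str.len b then some (pvFace a)
  else some (pvFace a ++ "'")

-- the loop body of Source B: state = (emitted output, merge buffer)
def pvStep (st : List String × Option String) (m : String) : List String × Option String :=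
  match st.2 with
  | none => (st.1, some m)
  | some b =>
    if PySem.Str.pyGet? b 0 ≠ PySem.Str.pyGet? m 0 then (st.1 ++ [b], some m)
    else (st.1, pvMerge b m)

def shorten_alg_alt (alg : List String) : List String :=
  let st := alg.foldl pvStep ([], none)
  match st.2 with
  | none => st.1
  | some b => st.1 ++ [b]

-- ===== PRECONDITION & SPEC =====
-- Pre_ excludes lists containing an empty-string move: on most such lists Python's A (and B alike)
-- raises IndexError on alg[i][0]; on the degenerate ones where the "" is never indexed both return it unchanged.
def Pre_shorten_alg (alg : List String) : Prop := "" ∉ alg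
instance (alg : List String) : Decidable (Pre_shorten_alg alg) := by unfold Pre_shorten_alg; infer_instance
def pvWitness_shorten_alg : List String := ["U", "U", "F'", "F'", "R"]
def Spec_shorten_alg (alg : List String) (out : List String) : Prop := out = shorten_alg_alt alg
instance (alg : List String) (out : List String) : Decidable (Spec_shorten_alg alg out) := by unfold Spec_shorten_alg; infer_instance

-- ===== CLAIM (what is proved, stated in full; the proofs are below) =====
def Claim_equal_shorten_alg : Prop := ∀ (alg : List String), Dom_shorten_alg alg → Pre_shorten_alg alg → Spec_shorten_alg alg (shorten_alg alg)

-- ===== LEMMAS AND PROOFS =====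

-- B's merge is exactly A's inline move computation
theorem pvMerge_toList (a b : String) :
    (pvMerge a b).toList =
      (if (a = b ∧ PySem.Str.pyGet? a (-1) = some '2') ∨ a ++ "'" = b ∨ a = b ++ "'" then
        ([] : List String)
      else if a = b then [pvFace a ++ "2"]
      else if PySem.Str.len a = PySem.Str.len b then [pvFace a]
      else [pvFace a ++ "'"]) := by
  unfold pvMerge
  split_ifs <;> simp

-- loop invariant: finishing B's fold from state (acc, buf) yields acc ++ A's result on buf.toList ++ alg
theorem pvLoop (n : Nat) : ∀ (alg : List String), alg.length ≤ n → ∀ (acc : List String) (buf : Option String),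
    (match (alg.foldl pvStep (acc, buf)).2 with
      | none => (alg.foldl pvStep (acc, buf)).1
      | some b => (alg.foldl pvStep (acc, buf)).1 ++ [b]) =
    acc ++ shorten_alg (buf.toList ++ alg) := by
  induction n with
  | zero =>
    intro alg hlen acc buf
    have : alg = [] := List.eq_nil_of_length_eq_zero (Nat.le_zero.mp hlen)
    subst this
    cases buf <;> simp [shorten_alg]
  | succ n ih =>
    intro alg hlen acc buf
    match alg with
    | [] => cases buf <;> simp [shorten_alg]
    | m :: rest =>
      have hr : rest.length ≤ n := by simpa using Nat.lt_succ_iff.mp (Nat.lt_of_lt_of_le (by simp) hlen)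
      cases buf with
      | none =>
        have := ih rest hr acc (some m)
        simpa [pvStep] using this
      | some b =>
        by_cases h : PySem.Str.pyGet? b 0 ≠ PySem.Str.pyGet? m 0
        · have := ih rest hr (acc ++ [b]) (some m)
          rw [List.foldl_cons]
          simp only [pvStep, if_pos h]
          rw [this]
          rw [show (some b).toList ++ m :: rest = b :: m :: rest from rfl]
          conv_rhs => rw [shorten_alg]
          rw [if_pos h]
          simp
        · have := ih rest hr acc (pvMerge b m)
          rw [List.foldl_cons]
          simp only [pvStep, if_neg h]
          rw [this]
          rw [show (some b).toList ++ m :: rest = b :: m :: rest from rfl]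
          conv_rhs => rw [shorten_alg]
          simp only [if_neg h]
          rw [← pvMerge_toList b m]

-- ===== VERDICT (by name: the statement is the Claim_ definition above) =====
theorem shorten_alg_spec : Claim_equal_shorten_alg := by
  intro alg _ _
  unfold Spec_shorten_alg shorten_alg_alt
  have := pvLoop alg.length alg (le_refl _) [] none
  simp only [Option.toList, List.nil_append] at this
  simp [this]
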